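-- pv_equiv track=rewrite | github.com/rosualinpetru/ers | ers/schemes/hilbert/range_brc_hilbert.py | _descend_tree
-- ===== SOURCE A (Python) =====
-- from typing import Dict, List, Set
--
-- def _descend_tree(val: int, r: tuple[int, int]) -> List[tuple[int, int]]:
--     ranges = []
--     while r != (val, val):
--         ranges.append(r)
--         if val <= ((r[0] + r[1]) // 2):
--             r = (r[0], ((r[0] + r[1]) // 2))
--         else:
--             r = (((r[0] + r[1]) // 2) + 1, r[1])
--
--     ranges.append((val, val))
--     return ranges
-- ===== SOURCE B (Python) =====
-- from typing import Dict, List, Set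
--
-- def _descend_tree(val: int, r: tuple[int, int]) -> List[tuple[int, int]]:
--     # Build the path bottom-up in a tail-recursive accumulator (newest range in
--     # front), then reverse once at the end.
--     def go(p, acc):
--         acc = [p] + acc
--         if p == (val, val):
--             return acc
--         m = (p[0] + p[1]) // 2
--         return go((p[0], m) if val <= m else (m + 1, p[1]), acc)
--     return list(reversed(go(r, [])))
-- ===== Notes on version B (the rewrite author's own statement) =====
-- stated objective: alternative
-- what changed: Replaces A's while-loop that appends each range to the end of a growing list by a tail-recursive descent that conses each range onto a reversed accumulator and reverses the result once at the end.
import Mathlib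
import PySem

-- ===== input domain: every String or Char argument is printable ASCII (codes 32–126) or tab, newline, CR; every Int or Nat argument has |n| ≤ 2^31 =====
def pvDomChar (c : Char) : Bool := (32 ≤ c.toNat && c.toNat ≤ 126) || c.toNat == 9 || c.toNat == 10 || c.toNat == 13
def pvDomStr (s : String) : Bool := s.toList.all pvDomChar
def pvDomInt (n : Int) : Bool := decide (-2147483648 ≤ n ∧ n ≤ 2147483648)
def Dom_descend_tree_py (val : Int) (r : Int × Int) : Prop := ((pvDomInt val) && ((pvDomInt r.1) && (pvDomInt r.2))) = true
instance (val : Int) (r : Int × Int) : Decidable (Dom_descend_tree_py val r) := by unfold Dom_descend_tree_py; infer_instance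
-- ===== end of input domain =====

-- B replaces A's forward while-loop (append at the end of a growing list) by a
-- tail-recursive descent consing onto a reversed accumulator, reversed once at
-- the end (objective: alternative). Return values agree on Pre_.

-- ===== PORT A =====
-- while-loop with fuel ((r.2-r.1).toNat + 1, enough on every Pre_ input; the 0-fuel
-- branch is never reached inside Pre_ — outside Pre_ the Python loop never terminates)
def descendLoopA : Nat → Int → (Int × Int) → List (Int × Int) → List (Int × Int)
  | 0, _, _, ranges => ranges
  | n+1, val, r, ranges =>
    if r = (val, val) then ranges ++ [(val, val)]
    else
      if val ≤ PySem.Int.floordiv (r.1 + r.2) 2 then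
        descendLoopA n val (r.1, PySem.Int.floordiv (r.1 + r.2) 2) (ranges ++ [r])
      else
        descendLoopA n val (PySem.Int.floordiv (r.1 + r.2) 2 + 1, r.2) (ranges ++ [r])

def descend_tree_py (val : Int) (r : Int × Int) : List (Int × Int) :=
  descendLoopA ((r.2 - r.1).toNat + 1) val r []

-- ===== PORT B =====
-- tail recursion consing onto acc, same fuel bound (Source B's recursion likewise
-- diverges in Python outside Pre_); final reverse as in Source B
def descendGoB : Nat → Int → (Int × Int) → List (Int × Int) → List (Int × Int)
  | 0, _, _, acc => acc
  | n+1, val, p, acc =>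
    if p = (val, val) then p :: acc
    else
      let m := PySem.Int.floordiv (p.1 + p.2) 2
      descendGoB n val (if val ≤ m then (p.1, m) else (m + 1, p.2)) (p :: acc)

def descend_tree_py_alt (val : Int) (r : Int × Int) : List (Int × Int) :=
  (descendGoB ((r.2 - r.1).toNat + 1) val r []).reverse

-- ===== PRECONDITION & SPEC =====
-- Pre_ excludes val outside [r.1, r.2] (including r.1 > r.2), exactly the inputs
-- on which the Python while-loop of A never terminates (B's recursion likewise).
def Pre_descend_tree_py (val : Int) (r : Int × Int) : Prop := r.1 ≤ val ∧ val ≤ r.2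
instance (val : Int) (r : Int × Int) : Decidable (Pre_descend_tree_py val r) := by unfold Pre_descend_tree_py; infer_instance

def pvWitness_descend_tree_py : Int × (Int × Int) := (2, (0, 7))

def Spec_descend_tree_py (val : Int) (r : Int × Int) (out : List (Int × Int)) : Prop := out = descend_tree_py_alt val r
instance (val : Int) (r : Int × Int) (out : List (Int × Int)) : Decidable (Spec_descend_tree_py val r out) := by unfold Spec_descend_tree_py; infer_instance

-- ===== CLAIM (what is proved, stated in full; the proofs are below) =====
def Claim_equal_descend_tree_py : Prop := ∀ (val : Int) (r : Int × Int), Dom_descend_tree_py val r → Pre_descend_tree_py val r → Spec_descend_tree_py val r (descend_tree_py val r)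

-- ===== LEMMAS AND PROOFS =====

-- the accumulator of B's tail recursion is a pure suffix
theorem descendGoB_acc (n : Nat) : ∀ (val : Int) (p : Int × Int) (acc : List (Int × Int)),
    descendGoB n val p acc = descendGoB n val p [] ++ acc := by
  induction n with
  | zero => intro val p acc; simp [descendGoB]
  | succ n ih =>
    intro val p acc
    by_cases hp : p = (val, val)
    · simp [descendGoB, hp]
    · simp only [descendGoB, if_neg hp]
      rw [ih val _ (p :: acc), ih val _ (p :: [])]
      simp

theorem descendLoopA_eq (n : Nat) : ∀ (val : Int) (r : Int × Int) (acc : List (Int × Int)),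
    r.1 ≤ val → val ≤ r.2 → (r.2 - r.1).toNat < n →
    descendLoopA n val r acc = acc ++ (descendGoB n val r []).reverse := by
  induction n with
  | zero => intro val r acc _ _ h; omega
  | succ n ih =>
    intro val r acc h1 h2 hn
    by_cases hr : r = (val, val)
    · simp [descendLoopA, descendGoB, hr]
    · have hmid : PySem.Int.floordiv (r.1 + r.2) 2 = (r.1 + r.2) / 2 :=
        PySem.Int.floordiv_eq_ediv_of_pos (by norm_num)
      have hlt : r.1 < r.2 := by
        rcases lt_or_eq_of_le (le_trans h1 h2) with h | h
        · exact h
        · exfalso; apply hr; cases r; simp_all only [Prod.mk.injEq]; omega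
      by_cases hb : val ≤ (r.1 + r.2) / 2
      · have stepA : descendLoopA (n+1) val r acc =
            descendLoopA n val (r.1, PySem.Int.floordiv (r.1 + r.2) 2) (acc ++ [r]) := by
          simp [descendLoopA, hr, hb]
        have stepB : descendGoB (n+1) val r [] =
            descendGoB n val (r.1, PySem.Int.floordiv (r.1 + r.2) 2) [] ++ [r] := by
          simp only [descendGoB, if_neg hr, hmid, if_pos hb]
          exact descendGoB_acc n val _ [r]
        rw [stepA, stepB,
          ih val (r.1, PySem.Int.floordiv (r.1 + r.2) 2) (acc ++ [r]) h1 (by rw [hmid]; exact hb)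
            (by rw [hmid]; simp only []; omega)]
        simp
      · have stepA : descendLoopA (n+1) val r acc =
            descendLoopA n val (PySem.Int.floordiv (r.1 + r.2) 2 + 1, r.2) (acc ++ [r]) := by
          simp [descendLoopA, hr, hb]
        have stepB : descendGoB (n+1) val r [] =
            descendGoB n val (PySem.Int.floordiv (r.1 + r.2) 2 + 1, r.2) [] ++ [r] := by
          simp only [descendGoB, if_neg hr, hmid, if_neg hb]
          exact descendGoB_acc n val _ [r]
        rw [stepA, stepB,
          ih val (PySem.Int.floordiv (r.1 + r.2) 2 + 1, r.2) (acc ++ [r])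
            (by rw [hmid]; simp only []; omega) h2 (by rw [hmid]; simp only []; omega)]
        simp

-- ===== VERDICT (by name: the statement is the Claim_ definition above) =====
theorem descend_tree_py_spec : Claim_equal_descend_tree_py := by
  intro val r _ hpre
  unfold Spec_descend_tree_py descend_tree_py descend_tree_py_alt
  exact (descendLoopA_eq _ val r [] hpre.1 hpre.2 (by omega)).trans (by simp)
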